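-- pv_equiv track=rewrite | github.com/ljonestz/FCV-AGENT | tests/test_zone2_compact_label.py | build_s1_label
-- ===== SOURCE A (Python) =====
-- def build_s1_label(is_impl, doc_parts):
--     """Mirrors the compact label logic to be added to app.py."""
--     primary_names = [dp['name'] for dp in doc_parts if dp['label'] == 'PROJECT DOCUMENT']
--     package_names = [dp['name'] for dp in doc_parts if dp['label'] == 'PACKAGE INSTRUMENT']
--     context_names = [dp['name'] for dp in doc_parts if dp['label'] == 'CONTEXT DOCUMENT']
--     base = "[Stage 1 — implementation documents and FCV context analysed]" if is_impl \
--            else "[Stage 1 — project documents and FCV context analysed]"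
--     parts = [f"Primary: {primary_names[0]}" if primary_names else ""]
--     if package_names:
--         parts.append(f"Package: {', '.join(package_names)}")
--     if context_names:
--         parts.append(f"Country context: {', '.join(context_names)}")
--     suffix = ". ".join(p for p in parts if p)
--     return f"{base} {suffix}".strip() if suffix else base
-- ===== SOURCE B (Python) =====
-- def build_s1_label(is_impl, doc_parts):
--     """One pass with scalar accumulators: captures the first primary name and builds the
--     comma-joined package/context strings incrementally; no intermediate lists, no join."""
--     primary = package = context = None
--     for dp in doc_parts:
--         lab = dp['label']
--         if lab == 'PROJECT DOCUMENT':
--             n = dp['name']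
--             if primary is None:
--                 primary = n
--         elif lab == 'PACKAGE INSTRUMENT':
--             n = dp['name']
--             package = n if package is None else package + ", " + n
--         elif lab == 'CONTEXT DOCUMENT':
--             n = dp['name']
--             context = n if context is None else context + ", " + n
--     suffix = ""
--     if primary is not None:
--         suffix = "Primary: " + primary
--     if package is not None:
--         suffix = (suffix + ". " if suffix else "") + "Package: " + package
--     if context is not None:
--         suffix = (suffix + ". " if suffix else "") + "Country context: " + context
--     base = ("[Stage 1 — implementation documents and FCV context analysed]" if is_impl
--             else "[Stage 1 — project documents and FCV context analysed]")
--     return (base + " " + suffix).strip() if suffix else base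
-- ===== Notes on version B (the rewrite author's own statement) =====
-- stated objective: alternative
-- what changed: Replaced A's three list comprehensions plus parts-list/filter/join assembly by a single pass over doc_parts with three scalar accumulators (first primary name as an Option, package/context built as incrementally comma-joined strings) and direct string concatenation of the suffix; no intermediate name lists and no join calls.
import Mathlib
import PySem

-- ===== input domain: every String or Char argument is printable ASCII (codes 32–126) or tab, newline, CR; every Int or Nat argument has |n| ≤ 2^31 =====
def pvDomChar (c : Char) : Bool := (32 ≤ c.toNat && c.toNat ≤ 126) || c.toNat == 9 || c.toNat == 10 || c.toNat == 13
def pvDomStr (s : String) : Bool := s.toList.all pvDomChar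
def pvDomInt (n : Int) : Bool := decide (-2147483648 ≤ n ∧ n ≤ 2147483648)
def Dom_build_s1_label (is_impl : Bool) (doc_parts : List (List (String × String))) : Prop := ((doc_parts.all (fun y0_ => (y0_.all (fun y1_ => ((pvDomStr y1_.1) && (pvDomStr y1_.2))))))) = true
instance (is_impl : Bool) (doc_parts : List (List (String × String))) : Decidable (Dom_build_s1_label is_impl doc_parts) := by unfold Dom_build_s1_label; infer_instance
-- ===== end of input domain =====

-- B replaces A's three comprehension scans and parts-list/filter/join assembly by one pass with
-- three scalar accumulators and direct string concatenation (objective: alternative decomposition).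

-- ===== PORT A =====
-- dp['k'] on the association-list representation of a Python dict (first match; none = KeyError)
def pvDGet? (dp : List (String × String)) (k : String) : Option String :=
  (PySem.Dict.mk dp).get? k

-- [dp['name'] for dp in doc_parts if dp['label'] == lab]  (none = KeyError somewhere)
def pvCompNames (lab : String) (doc_parts : List (List (String × String))) : Option (List String) :=
  doc_parts.foldl (fun acc dp =>
    match acc with
    | none => none
    | some xs =>
      match pvDGet? dp "label" with
      | none => none
      | some l =>
        if l == lab then
          match pvDGet? dp "name" with
          | none => none
          | some n => some (xs ++ [n])
        else some xs) (some [])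

def build_s1_label (is_impl : Bool) (doc_parts : List (List (String × String))) : String :=
  (match pvCompNames "PROJECT DOCUMENT" doc_parts with
   | none => ""   -- KeyError: excluded by Pre_
   | some primary_names =>
   match pvCompNames "PACKAGE INSTRUMENT" doc_parts with
   | none => ""
   | some package_names =>
   match pvCompNames "CONTEXT DOCUMENT" doc_parts with
   | none => ""
   | some context_names =>
   let base := if is_impl then "[Stage 1 — implementation documents and FCV context analysed]"
               else "[Stage 1 — project documents and FCV context analysed]"
   let parts : List String :=
     [if primary_names = [] then "" else "Primary: " ++ PySem.List.pyGetD primary_names 0 ""]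
   let parts := if package_names = [] then parts
                else parts ++ ["Package: " ++ PySem.Str.join ", " package_names]
   let parts := if context_names = [] then parts
                else parts ++ ["Country context: " ++ PySem.Str.join ", " context_names]
   let suffix := PySem.Str.join ". " (parts.filter (fun p => p != ""))
   if suffix != "" then PySem.Str.strip (base ++ " " ++ suffix) else base)

-- ===== PORT B =====
-- the single pass: (primary?, package?, context?) scalar accumulators (none = KeyError)
def pvScanStep (acc : Option (Option String × Option String × Option String))
    (dp : List (String × String)) : Option (Option String × Option String × Option String) :=
  match acc with
  | none => none
  | some (p, k, c) =>
    match pvDGet? dp "label" with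
    | none => none
    | some l =>
      if l == "PROJECT DOCUMENT" then
        match pvDGet? dp "name" with
        | none => none
        | some n => some (if p.isNone then some n else p, k, c)
      else if l == "PACKAGE INSTRUMENT" then
        match pvDGet? dp "name" with
        | none => none
        | some n => some (p, some (match k with | none => n | some s => s ++ ", " ++ n), c)
      else if l == "CONTEXT DOCUMENT" then
        match pvDGet? dp "name" with
        | none => none
        | some n => some (p, k, some (match c with | none => n | some s => s ++ ", " ++ n))
      else some (p, k, c)

def build_s1_label_alt (is_impl : Bool) (doc_parts : List (List (String × String))) : String :=
  match doc_parts.foldl pvScanStep (some (none, none, none)) with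
  | none => ""   -- KeyError: excluded by Pre_
  | some (p, k, c) =>
    let suffix := match p with | none => "" | some pn => "Primary: " ++ pn
    let suffix := match k with
                  | none => suffix
                  | some kn => (if suffix != "" then suffix ++ ". " else "") ++ "Package: " ++ kn
    let suffix := match c with
                  | none => suffix
                  | some cn => (if suffix != "" then suffix ++ ". " else "") ++ "Country context: " ++ cn
    let base := if is_impl then "[Stage 1 — implementation documents and FCV context analysed]"
                else "[Stage 1 — project documents and FCV context analysed]"
    if suffix != "" then PySem.Str.strip (base ++ " " ++ suffix) else base

-- ===== PRECONDITION & SPEC =====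
def pvRecog (l : String) : Bool :=
  l == "PROJECT DOCUMENT" || l == "PACKAGE INSTRUMENT" || l == "CONTEXT DOCUMENT"

-- Pre_ excludes exactly the inputs on which A raises KeyError: a part without a 'label' key,
-- or a part whose (recognised) label comes without a 'name' key.
def pvPartOK (dp : List (String × String)) : Bool :=
  match pvDGet? dp "label" with
  | none => false
  | some l => !pvRecog l || (pvDGet? dp "name").isSome

def Pre_build_s1_label (is_impl : Bool) (doc_parts : List (List (String × String))) : Prop :=
  doc_parts.all pvPartOK = true
instance (is_impl : Bool) (doc_parts : List (List (String × String))) : Decidable (Pre_build_s1_label is_impl doc_parts) := by unfold Pre_build_s1_label; infer_instance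

def pvWitness_build_s1_label : Bool × (List (List (String × String))) :=
  (true, [[("label", "PROJECT DOCUMENT"), ("name", "Doc A")]])

def Spec_build_s1_label (is_impl : Bool) (doc_parts : List (List (String × String))) (out : String) : Prop := out = build_s1_label_alt is_impl doc_parts
instance (is_impl : Bool) (doc_parts : List (List (String × String))) (out : String) : Decidable (Spec_build_s1_label is_impl doc_parts out) := by unfold Spec_build_s1_label; infer_instance

-- ===== CLAIM (what is proved, stated in full; the proofs are below) =====
def Claim_equal_build_s1_label : Prop := ∀ (is_impl : Bool) (doc_parts : List (List (String × String))), Dom_build_s1_label is_impl doc_parts → Pre_build_s1_label is_impl doc_parts → Spec_build_s1_label is_impl doc_parts (build_s1_label is_impl doc_parts)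

-- ===== LEMMAS AND PROOFS =====

-- the common specification of the per-label name list
def pvSpecNames (lab : String) (doc_parts : List (List (String × String))) : List String :=
  doc_parts.filterMap (fun dp =>
    if pvDGet? dp "label" == some lab then pvDGet? dp "name" else none)

-- incremental comma-joining, as B's accumulator does it
def pvJoinAcc (a : Option String) (ns : List String) : Option String :=
  ns.foldl (fun a n => some (match a with | none => n | some s => s ++ ", " ++ n)) a

theorem pvCompNames_fold_ok (lab : String) (hlab : pvRecog lab = true) :
    ∀ (dps : List (List (String × String))) (xs : List String), dps.all pvPartOK = true →
      dps.foldl (fun acc dp =>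
        match acc with
        | none => none
        | some xs =>
          match pvDGet? dp "label" with
          | none => none
          | some l =>
            if l == lab then
              match pvDGet? dp "name" with
              | none => none
              | some n => some (xs ++ [n])
            else some xs) (some xs) = some (xs ++ pvSpecNames lab dps) := by
  intro dps
  induction dps with
  | nil => intro xs _; simp [pvSpecNames]
  | cons dp rest ih =>
    intro xs hall
    simp only [List.all_cons, Bool.and_eq_true] at hall
    obtain ⟨hok, hrest⟩ := hall
    unfold pvPartOK at hok
    cases hl : pvDGet? dp "label" with
    | none => rw [hl] at hok; simp at hok
    | some l =>
      rw [hl] at hok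
      by_cases heq : l == lab
      · have hleq : l = lab := by simpa using heq
        have hrec : pvRecog l = true := hleq ▸ hlab
        simp only [hrec, Bool.not_true, Bool.false_or] at hok
        cases hn : pvDGet? dp "name" with
        | none => rw [hn] at hok; simp at hok
        | some n =>
          simp only [List.foldl_cons, hl, heq, if_pos, hn]
          rw [ih (xs ++ [n]) hrest]
          simp [pvSpecNames, List.filterMap_cons, hl, hleq, hn]
      · have hne : l ≠ lab := fun h => heq (by simp [h])
        simp only [List.foldl_cons, hl]
        rw [if_neg (by simpa using hne)]
        rw [ih xs hrest]
        simp [pvSpecNames, List.filterMap_cons, hl, hne]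

theorem pvCompNames_ok (lab : String) (hlab : pvRecog lab = true)
    (dps : List (List (String × String))) (h : dps.all pvPartOK = true) :
    pvCompNames lab dps = some (pvSpecNames lab dps) := by
  have := pvCompNames_fold_ok lab hlab dps [] h
  simpa [pvCompNames] using this

-- invariant of B's single pass: the triple is (first primary so far, joined package, joined context)
theorem pvScan_fold_ok :
    ∀ (dps : List (List (String × String))), dps.all pvPartOK = true →
      ∀ (p k c : Option String),
      dps.foldl pvScanStep (some (p, k, c)) =
        some (p.or (pvSpecNames "PROJECT DOCUMENT" dps).head?,
              pvJoinAcc k (pvSpecNames "PACKAGE INSTRUMENT" dps),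
              pvJoinAcc c (pvSpecNames "CONTEXT DOCUMENT" dps)) := by
  intro dps
  induction dps with
  | nil => intro _ p k c; simp [pvSpecNames, pvJoinAcc]
  | cons dp rest ih =>
    intro hall p k c
    simp only [List.all_cons, Bool.and_eq_true] at hall
    obtain ⟨hok, hrest⟩ := hall
    unfold pvPartOK at hok
    cases hl : pvDGet? dp "label" with
    | none => rw [hl] at hok; simp at hok
    | some l =>
      rw [hl] at hok
      by_cases h1 : l = "PROJECT DOCUMENT"
      · have hrec : pvRecog l = true := by rw [h1]; decide
        simp only [hrec, Bool.not_true, Bool.false_or] at hok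
        cases hn : pvDGet? dp "name" with
        | none => rw [hn] at hok; simp at hok
        | some n =>
          simp only [List.foldl_cons, pvScanStep, hl, h1, hn, BEq.rfl, if_pos]
          rw [ih hrest]
          have e1 : pvSpecNames "PROJECT DOCUMENT" (dp :: rest) =
              n :: pvSpecNames "PROJECT DOCUMENT" rest := by
            simp [pvSpecNames, List.filterMap_cons, hl, h1, hn]
          have e2 : pvSpecNames "PACKAGE INSTRUMENT" (dp :: rest) =
              pvSpecNames "PACKAGE INSTRUMENT" rest := by
            simp [pvSpecNames, List.filterMap_cons, hl, h1]
          have e3 : pvSpecNames "CONTEXT DOCUMENT" (dp :: rest) =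
              pvSpecNames "CONTEXT DOCUMENT" rest := by
            simp [pvSpecNames, List.filterMap_cons, hl, h1]
          rw [e1, e2, e3]
          cases p <;> simp [Option.or]
      · by_cases h2 : l = "PACKAGE INSTRUMENT"
        · have hrec : pvRecog l = true := by rw [h2]; decide
          simp only [hrec, Bool.not_true, Bool.false_or] at hok
          cases hn : pvDGet? dp "name" with
          | none => rw [hn] at hok; simp at hok
          | some n =>
            simp only [List.foldl_cons, pvScanStep, hl, h2, hn,
              show (("PACKAGE INSTRUMENT" : String) == "PROJECT DOCUMENT") = false from by decide,
              BEq.rfl, if_pos, Bool.false_eq_true, if_false]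
            rw [ih hrest]
            have e1 : pvSpecNames "PROJECT DOCUMENT" (dp :: rest) =
                pvSpecNames "PROJECT DOCUMENT" rest := by
              simp [pvSpecNames, List.filterMap_cons, hl, h1]
            have e2 : pvSpecNames "PACKAGE INSTRUMENT" (dp :: rest) =
                n :: pvSpecNames "PACKAGE INSTRUMENT" rest := by
              simp [pvSpecNames, List.filterMap_cons, hl, h2, hn]
            have e3 : pvSpecNames "CONTEXT DOCUMENT" (dp :: rest) =
                pvSpecNames "CONTEXT DOCUMENT" rest := by
              simp [pvSpecNames, List.filterMap_cons, hl, h2]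
            rw [e1, e2, e3]
            simp [pvJoinAcc]
        · by_cases h3 : l = "CONTEXT DOCUMENT"
          · have hrec : pvRecog l = true := by rw [h3]; decide
            simp only [hrec, Bool.not_true, Bool.false_or] at hok
            cases hn : pvDGet? dp "name" with
            | none => rw [hn] at hok; simp at hok
            | some n =>
              simp only [List.foldl_cons, pvScanStep, hl, h3, hn,
                show (("CONTEXT DOCUMENT" : String) == "PROJECT DOCUMENT") = false from by decide,
                show (("CONTEXT DOCUMENT" : String) == "PACKAGE INSTRUMENT") = false from by decide,
                BEq.rfl, if_pos, Bool.false_eq_true, if_false]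
              rw [ih hrest]
              have e1 : pvSpecNames "PROJECT DOCUMENT" (dp :: rest) =
                  pvSpecNames "PROJECT DOCUMENT" rest := by
                simp [pvSpecNames, List.filterMap_cons, hl, h1]
              have e2 : pvSpecNames "PACKAGE INSTRUMENT" (dp :: rest) =
                  pvSpecNames "PACKAGE INSTRUMENT" rest := by
                simp [pvSpecNames, List.filterMap_cons, hl, h2]
              have e3 : pvSpecNames "CONTEXT DOCUMENT" (dp :: rest) =
                  n :: pvSpecNames "CONTEXT DOCUMENT" rest := by
                simp [pvSpecNames, List.filterMap_cons, hl, h3, hn]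
              rw [e1, e2, e3]
              simp [pvJoinAcc]
          · have hb1 : (l == "PROJECT DOCUMENT") = false := by simp [h1]
            have hb2 : (l == "PACKAGE INSTRUMENT") = false := by simp [h2]
            have hb3 : (l == "CONTEXT DOCUMENT") = false := by simp [h3]
            simp only [List.foldl_cons, pvScanStep, hl, hb1, hb2, hb3,
              Bool.false_eq_true, if_false]
            rw [ih hrest]
            have e1 : pvSpecNames "PROJECT DOCUMENT" (dp :: rest) =
                pvSpecNames "PROJECT DOCUMENT" rest := by
              simp [pvSpecNames, List.filterMap_cons, hl, h1]
            have e2 : pvSpecNames "PACKAGE INSTRUMENT" (dp :: rest) =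
                pvSpecNames "PACKAGE INSTRUMENT" rest := by
              simp [pvSpecNames, List.filterMap_cons, hl, h2]
            have e3 : pvSpecNames "CONTEXT DOCUMENT" (dp :: rest) =
                pvSpecNames "CONTEXT DOCUMENT" rest := by
              simp [pvSpecNames, List.filterMap_cons, hl, h3]
            rw [e1, e2, e3]

-- B's incremental comma-join equals Python's ", ".join
theorem str_join_cons_cons (sep p q : String) (rest : List String) :
    PySem.Str.join sep (p :: q :: rest) = p ++ sep ++ PySem.Str.join sep (q :: rest) := by
  apply String.toList_injective
  simp [PySem.Str.toList_join, PySem.Chars.join_cons_cons]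

theorem str_join_single (sep s : String) : PySem.Str.join sep [s] = s := by
  apply String.toList_injective
  simp [PySem.Str.toList_join, PySem.Chars.join_singleton]

theorem str_join_glue (sep s n : String) (rest : List String) :
    PySem.Str.join sep ((s ++ sep ++ n) :: rest) = s ++ sep ++ PySem.Str.join sep (n :: rest) := by
  cases rest with
  | nil => rw [str_join_single, str_join_single]
  | cons r rs =>
    rw [str_join_cons_cons, str_join_cons_cons]
    simp [String.append_assoc]

theorem pvJoinAcc_some (ns : List String) : ∀ (s : String),
    pvJoinAcc (some s) ns = some (PySem.Str.join ", " (s :: ns)) := by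
  induction ns with
  | nil => intro s; simp [pvJoinAcc, str_join_single]
  | cons n rest ih =>
    intro s
    simp only [pvJoinAcc, List.foldl_cons] at *
    rw [ih (s ++ ", " ++ n), str_join_glue, ← str_join_cons_cons]

theorem pvJoinAcc_none (x : String) (rest : List String) :
    pvJoinAcc none (x :: rest) = some (PySem.Str.join ", " (x :: rest)) := by
  simp only [pvJoinAcc, List.foldl_cons]
  exact pvJoinAcc_some rest x

theorem pv_append_ne_empty (s t : String) (h : s.toList ≠ []) : (s ++ t) ≠ "" := by
  intro he
  apply h
  have hts := congrArg String.toList he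
  rw [String.toList_append] at hts
  simp at hts
  rw [hts.1]; decide

theorem pv_join_cons_ne_empty (sep x : String) (rest : List String)
    (hx : x.toList ≠ []) : PySem.Str.join sep (x :: rest) ≠ "" := by
  intro he
  apply hx
  have hts := congrArg String.toList he
  rw [PySem.Str.toList_join] at hts
  simp only [List.map_cons, PySem.Chars.join] at hts
  cases rest with
  | nil => simpa [List.intercalate] using hts
  | cons r rs =>
    simp only [List.intercalate, List.intersperse] at hts
    simp at hts
    rw [hts.1]; decide

theorem pvPrimary_ne (s : String) : ("Primary: " ++ s) ≠ "" :=
  pv_append_ne_empty _ _ (by decide)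
theorem pvPackage_ne (s : String) : ("Package: " ++ s) ≠ "" :=
  pv_append_ne_empty _ _ (by decide)
theorem pvContext_ne (s : String) : ("Country context: " ++ s) ≠ "" :=
  pv_append_ne_empty _ _ (by decide)
theorem pvJoinPrimary_ne (s : String) (rest : List String) :
    PySem.Str.join ". " (("Primary: " ++ s) :: rest) ≠ "" :=
  pv_join_cons_ne_empty _ _ _ (by
    rw [String.toList_append]
    exact List.append_ne_nil_of_left_ne_nil (by decide) _)
theorem pvJoinPackage_ne (s : String) (rest : List String) :
    PySem.Str.join ". " (("Package: " ++ s) :: rest) ≠ "" :=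
  pv_join_cons_ne_empty _ _ _ (by
    rw [String.toList_append]
    exact List.append_ne_nil_of_left_ne_nil (by decide) _)
theorem pvJoin_nil : PySem.Str.join ". " ([] : List String) = "" := by decide
theorem pvJoin_single (s : String) : PySem.Str.join ". " [s] = s := str_join_single _ _
theorem pvPrimary_bne (s : String) : (("Primary: " ++ s) != "") = true := by
  simp [pvPrimary_ne s]
theorem pvPackage_bne (s : String) : (("Package: " ++ s) != "") = true := by
  simp [pvPackage_ne s]
theorem pvContext_bne (s : String) : (("Country context: " ++ s) != "") = true := by
  simp [pvContext_ne s]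

-- ===== VERDICT (by name: the statement is the Claim_ definition above) =====
theorem build_s1_label_spec : Claim_equal_build_s1_label := by
  intro is_impl dps _ hpre
  unfold Spec_build_s1_label build_s1_label build_s1_label_alt
  have hP := pvCompNames_ok "PROJECT DOCUMENT" (by decide) dps hpre
  have hK := pvCompNames_ok "PACKAGE INSTRUMENT" (by decide) dps hpre
  have hC := pvCompNames_ok "CONTEXT DOCUMENT" (by decide) dps hpre
  have hS := pvScan_fold_ok dps hpre none none none
  rw [hP, hK, hC, hS]
  set P := pvSpecNames "PROJECT DOCUMENT" dps with hPdef
  set K := pvSpecNames "PACKAGE INSTRUMENT" dps with hKdef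
  set C := pvSpecNames "CONTEXT DOCUMENT" dps with hCdef
  cases P with
  | nil =>
    cases K with
    | nil =>
      cases C with
      | nil => simp [pvJoinAcc, Option.or, pvJoin_nil, List.filter]
      | cons c cs =>
        rw [pvJoinAcc_none c cs]
        simp [pvJoinAcc, Option.or, List.filter, pvJoin_single,
          pvContext_bne, pvContext_ne]
    | cons k ks =>
      rw [pvJoinAcc_none k ks]
      cases C with
      | nil =>
        simp [pvJoinAcc, Option.or, List.filter, pvJoin_single,
          pvPackage_bne, pvPackage_ne]
      | cons c cs =>
        rw [pvJoinAcc_none c cs]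
        simp [Option.or, List.filter, pvPackage_bne, pvContext_bne,
          pvJoinPackage_ne, pvJoin_single, str_join_cons_cons, ← String.append_assoc]
  | cons p ps =>
    cases K with
    | nil =>
      cases C with
      | nil =>
        simp [pvJoinAcc, Option.or, List.filter, pvJoin_single,
          pvPrimary_bne, pvPrimary_ne, PySem.List.pyGetD]
      | cons c cs =>
        rw [pvJoinAcc_none c cs]
        simp [pvJoinAcc, Option.or, List.filter, pvPrimary_bne, pvContext_bne,
          pvJoinPrimary_ne, pvJoin_single, str_join_cons_cons, ← String.append_assoc, PySem.List.pyGetD]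
    | cons k ks =>
      rw [pvJoinAcc_none k ks]
      cases C with
      | nil =>
        simp [pvJoinAcc, Option.or, List.filter, pvPrimary_bne, pvPackage_bne,
          pvJoinPrimary_ne, pvJoin_single, str_join_cons_cons, ← String.append_assoc, PySem.List.pyGetD]
      | cons c cs =>
        rw [pvJoinAcc_none c cs]
        simp [Option.or, List.filter, pvPrimary_bne, pvPackage_bne, pvContext_bne,
          pvJoinPrimary_ne, pvJoinPackage_ne, pvJoin_single, str_join_cons_cons, ← String.append_assoc,
          PySem.List.pyGetD]
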